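-- pv_equiv track=rewrite | github.com/michelzappy/zappy-scratch-091225 | frontend_agents/automated_fixing_orchestrator.py | _assess_impact_level
-- ===== SOURCE A (Python) =====
-- from typing import List, Dict, Any, Optional, Tuple, Set
--
-- def _assess_impact_level(issue: Dict[str, Any]) -> str:
--     """Assess the impact level of an issue."""
--     title = issue.get('title', '').lower()
--     description = issue.get('description', '').lower()
--     issue_type = issue.get('type', '').lower()
--     severity = issue.get('severity', '').lower()
--
--     # Critical: Breaks core functionality
--     critical_indicators = [
--         'critical', 'broken page', '404', 'crash', 'error 500',
--         'login broken', 'cannot access', 'site down'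
--     ]
--     if (severity == 'critical' or
--         any(indicator in title or indicator in description for indicator in critical_indicators)):
--         return 'critical'
--
--     # High: Major user experience issues
--     high_indicators = [
--         'navigation broken', 'missing page', 'broken link', 'cannot navigate',
--         'form broken', 'button not working', 'api error', 'data not loading'
--     ]
--     if (issue_type in ['navigation_issue', 'missing_element'] or
--         any(indicator in title or indicator in description for indicator in high_indicators)):
--         return 'high'
--
--     # Medium: Moderate improvements
--     medium_indicators = [
--         'loading state', 'error handling', 'user feedback', 'state management',
--         'async issue', 'useeffect', 'dependency'
--     ]
--     if (issue_type in ['api_connection', 'broken_flow', 'state_issue'] or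
--         any(indicator in title or indicator in description for indicator in medium_indicators)):
--         return 'medium'
--
--     # Low: Nice to have fixes
--     return 'low'
-- ===== SOURCE B (Python) =====
-- def _assess_impact_level(issue):
--     """Assess impact: compute the max rank over one flat keyword/type table."""
--     title = issue.get('title', '').lower()
--     description = issue.get('description', '').lower()
--     issue_type = issue.get('type', '').lower()
--     severity = issue.get('severity', '').lower()
--
--     LEVELS = ['low', 'medium', 'high', 'critical']
--     KEYWORD_RANK = {
--         'critical': 3, 'broken page': 3, '404': 3, 'crash': 3, 'error 500': 3,
--         'login broken': 3, 'cannot access': 3, 'site down': 3,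
--         'navigation broken': 2, 'missing page': 2, 'broken link': 2,
--         'cannot navigate': 2, 'form broken': 2, 'button not working': 2,
--         'api error': 2, 'data not loading': 2,
--         'loading state': 1, 'error handling': 1, 'user feedback': 1,
--         'state management': 1, 'async issue': 1, 'useeffect': 1, 'dependency': 1,
--     }
--     TYPE_RANK = {'navigation_issue': 2, 'missing_element': 2,
--                  'api_connection': 1, 'broken_flow': 1, 'state_issue': 1}
--     rank = max(
--         [3 if severity == 'critical' else 0,
--          TYPE_RANK.get(issue_type, 0)]
--         + [r for kw, r in KEYWORD_RANK.items()
--            if kw in title or kw in description])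
--     return LEVELS[rank]
-- ===== Notes on version B (the rewrite author's own statement) =====
-- stated objective: alternative
-- what changed: Instead of A's ordered early-return if-blocks per level, B computes a numeric rank as the max over one flat keyword->rank table plus severity/type contributions in a single accumulation, then indexes a levels list.
import Mathlib
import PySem

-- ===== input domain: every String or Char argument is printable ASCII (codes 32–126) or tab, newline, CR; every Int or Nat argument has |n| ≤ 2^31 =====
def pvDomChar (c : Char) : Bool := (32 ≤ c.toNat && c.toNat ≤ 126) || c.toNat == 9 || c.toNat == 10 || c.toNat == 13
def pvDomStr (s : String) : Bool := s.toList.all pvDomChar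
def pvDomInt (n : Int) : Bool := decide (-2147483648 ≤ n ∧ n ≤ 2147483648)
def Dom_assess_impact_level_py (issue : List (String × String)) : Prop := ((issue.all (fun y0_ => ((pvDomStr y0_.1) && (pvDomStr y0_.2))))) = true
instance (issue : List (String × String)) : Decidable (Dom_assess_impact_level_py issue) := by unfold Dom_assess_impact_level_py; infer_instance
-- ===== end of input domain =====

-- B replaces A's ordered early-return if-blocks by a single max-rank accumulation over one flat keyword table (alternative decomposition, same cost).

-- ===== PORT A =====
def assess_impact_level_py (issue : List (String × String)) : String :=
  let d := PySem.Dict.mk issue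
  let title := PySem.Str.lower (d.getD "title" "")
  let description := PySem.Str.lower (d.getD "description" "")
  let issue_type := PySem.Str.lower (d.getD "type" "")
  let severity := PySem.Str.lower (d.getD "severity" "")
  let critical_indicators : List String :=
    ["critical", "broken page", "404", "crash", "error 500",
     "login broken", "cannot access", "site down"]
  if severity == "critical" ||
     critical_indicators.any (fun ind => PySem.Str.isIn ind title || PySem.Str.isIn ind description) then
    "critical"
  else
    let high_indicators : List String :=
      ["navigation broken", "missing page", "broken link", "cannot navigate",
       "form broken", "button not working", "api error", "data not loading"]
    if ["navigation_issue", "missing_element"].contains issue_type ||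
       high_indicators.any (fun ind => PySem.Str.isIn ind title || PySem.Str.isIn ind description) then
      "high"
    else
      let medium_indicators : List String :=
        ["loading state", "error handling", "user feedback", "state management",
         "async issue", "useeffect", "dependency"]
      if ["api_connection", "broken_flow", "state_issue"].contains issue_type ||
         medium_indicators.any (fun ind => PySem.Str.isIn ind title || PySem.Str.isIn ind description) then
        "medium"
      else
        "low"

-- ===== PORT B =====
-- flat keyword → rank table (insertion order of Source B's KEYWORD_RANK dict)
def pvKwRank : List (String × Nat) :=
  [("critical", 3), ("broken page", 3), ("404", 3), ("crash", 3), ("error 500", 3),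
   ("login broken", 3), ("cannot access", 3), ("site down", 3),
   ("navigation broken", 2), ("missing page", 2), ("broken link", 2),
   ("cannot navigate", 2), ("form broken", 2), ("button not working", 2),
   ("api error", 2), ("data not loading", 2),
   ("loading state", 1), ("error handling", 1), ("user feedback", 1),
   ("state management", 1), ("async issue", 1), ("useeffect", 1), ("dependency", 1)]

def pvTypeRank : PySem.Dict String Nat :=
  PySem.Dict.mk [("navigation_issue", 2), ("missing_element", 2),
                 ("api_connection", 1), ("broken_flow", 1), ("state_issue", 1)]

def assess_impact_level_py_alt (issue : List (String × String)) : String :=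
  let d := PySem.Dict.mk issue
  let title := PySem.Str.lower (d.getD "title" "")
  let description := PySem.Str.lower (d.getD "description" "")
  let issue_type := PySem.Str.lower (d.getD "type" "")
  let severity := PySem.Str.lower (d.getD "severity" "")
  let levels : List String := ["low", "medium", "high", "critical"]
  -- max over the constructed list, exactly as Source B's max([...] + [...])
  let rank : Nat :=
    ((pvTypeRank.getD issue_type 0) ::
      pvKwRank.filterMap (fun p =>
        if PySem.Str.isIn p.1 title || PySem.Str.isIn p.1 description then some p.2 else none)).foldl
      max (if severity == "critical" then 3 else 0)
  -- list index LEVELS[rank]: rank ≤ 3 always, so getD is exact here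
  levels.getD rank "low"

-- ===== PRECONDITION & SPEC =====
def Spec_assess_impact_level_py (issue : List (String × String)) (out : String) : Prop := out = assess_impact_level_py_alt issue
instance (issue : List (String × String)) (out : String) : Decidable (Spec_assess_impact_level_py issue out) := by unfold Spec_assess_impact_level_py; infer_instance

-- ===== CLAIM (what is proved, stated in full; the proofs are below) =====
def Claim_equal_assess_impact_level_py : Prop := ∀ (issue : List (String × String)), Dom_assess_impact_level_py issue → Spec_assess_impact_level_py issue (assess_impact_level_py issue)

-- ===== LEMMAS AND PROOFS =====

-- fold of max over the filterMap of a constant-rank keyword group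
theorem pv_fold_group (hit : String → Bool) (r : Nat) (l : List String) (a : Nat) :
    (List.foldl max a (l.filterMap (fun s => if hit s = true then some r else none)))
      = if l.any hit = true then max a r else a := by
  induction l generalizing a with
  | nil => simp
  | cons s t ih =>
    by_cases h : hit s = true
    · simp only [List.filterMap_cons, h, if_true, List.foldl_cons, List.any_cons, Bool.true_or, ih]
      split <;> omega
    · rw [List.filterMap_cons, if_neg h, ih]
      simp [h]

theorem pv_kw_split :
    pvKwRank =
      (["critical", "broken page", "404", "crash", "error 500",
        "login broken", "cannot access", "site down"].map (fun s => (s, 3)))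
      ++ (["navigation broken", "missing page", "broken link", "cannot navigate",
           "form broken", "button not working", "api error", "data not loading"].map (fun s => (s, 2)))
      ++ (["loading state", "error handling", "user feedback", "state management",
           "async issue", "useeffect", "dependency"].map (fun s => (s, 1))) := rfl

theorem pv_type_rank (t : String) :
    pvTypeRank.getD t 0 =
      (if ["navigation_issue", "missing_element"].contains t then 2
       else if ["api_connection", "broken_flow", "state_issue"].contains t then 1 else 0) := by
  cases e1 : (t == "navigation_issue") <;>
  cases e2 : (t == "missing_element") <;>
  cases e3 : (t == "api_connection") <;>
  cases e4 : (t == "broken_flow") <;>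
  cases e5 : (t == "state_issue") <;>
    simp_all [pvTypeRank, PySem.Dict.getD, PySem.Dict.get?, List.find?, BEq.comm] <;>
    repeat' (split <;> simp_all)

theorem pv_main (title description issue_type severity : String) :
    (if severity == "critical" ||
        (["critical", "broken page", "404", "crash", "error 500",
          "login broken", "cannot access", "site down"] : List String).any
          (fun ind => PySem.Str.isIn ind title || PySem.Str.isIn ind description) then
      "critical"
     else if ["navigation_issue", "missing_element"].contains issue_type ||
        (["navigation broken", "missing page", "broken link", "cannot navigate",
          "form broken", "button not working", "api error", "data not loading"] : List String).any
          (fun ind => PySem.Str.isIn ind title || PySem.Str.isIn ind description) then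
      "high"
     else if ["api_connection", "broken_flow", "state_issue"].contains issue_type ||
        (["loading state", "error handling", "user feedback", "state management",
          "async issue", "useeffect", "dependency"] : List String).any
          (fun ind => PySem.Str.isIn ind title || PySem.Str.isIn ind description) then
      "medium"
     else "low")
    = (["low", "medium", "high", "critical"] : List String).getD
        (((pvTypeRank.getD issue_type 0) ::
          pvKwRank.filterMap (fun p =>
            if PySem.Str.isIn p.1 title || PySem.Str.isIn p.1 description then some p.2 else none)).foldl
          max (if severity == "critical" then 3 else 0)) "low" := by
  simp only [pv_kw_split, List.filterMap_append, List.foldl_cons, List.foldl_append,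
             List.filterMap_map, Function.comp_def, pv_fold_group, pv_type_rank]
  cases hsg : (severity == "critical") <;>
  cases h3 : ((["critical", "broken page", "404", "crash", "error 500",
               "login broken", "cannot access", "site down"] : List String).any
              fun ind => PySem.Str.isIn ind title || PySem.Str.isIn ind description) <;>
  cases h2 : ((["navigation broken", "missing page", "broken link", "cannot navigate",
               "form broken", "button not working", "api error", "data not loading"] : List String).any
              fun ind => PySem.Str.isIn ind title || PySem.Str.isIn ind description) <;>
  cases h1 : ((["loading state", "error handling", "user feedback", "state management",
               "async issue", "useeffect", "dependency"] : List String).any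
              fun ind => PySem.Str.isIn ind title || PySem.Str.isIn ind description) <;>
  cases ht2 : (["navigation_issue", "missing_element"].contains issue_type) <;>
  cases ht1 : (["api_connection", "broken_flow", "state_issue"].contains issue_type) <;>
    simp_all

theorem assess_impact_level_py_spec : Claim_equal_assess_impact_level_py := by
  intro issue _
  exact pv_main _ _ _ _
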